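-- pv_equiv track=rewrite | github.com/BhatMaya/Krave | stats.py | splitQuartiles
-- ===== SOURCE A (Python) =====
-- def splitQuartiles(restaurant_options, split_vals):
--     firstQuartile = {}
--     secondQuartile = {}
--     thirdQuartile = {}
--     fourthQuartile = {}
--     for key, value in restaurant_options.items():
--         if value < split_vals[0]:
--             firstQuartile[key] = value
--         if value >= split_vals[0] and value < split_vals[1]:
--             secondQuartile[key] = value
--         if value >= split_vals[1] and value < split_vals[2]:
--             thirdQuartile[key] = value
--         if value >= split_vals[2]:
--             fourthQuartile[key] = value
--     listedQuartiles = []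
--     if (len(firstQuartile) != 0):
--         listedQuartiles.append(firstQuartile)
--
--     if (len(secondQuartile) != 0):
--         listedQuartiles.append(secondQuartile)
--
--     if (len(thirdQuartile) != 0):
--         listedQuartiles.append(thirdQuartile)
--
--     if (len(fourthQuartile) != 0):
--         listedQuartiles.append(fourthQuartile)
--
--     return listedQuartiles
-- ===== SOURCE B (Python) =====
-- def splitQuartiles(restaurant_options, split_vals):
--     # Bucket-major: one generic boundary predicate, four filter passes over the items,
--     # then keep the non-empty buckets in order.
--     def in_bucket(i, v):
--         lo = split_vals[i - 1] if i > 0 else None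
--         hi = split_vals[i] if i < 3 else None
--         return (lo is None or v >= lo) and (hi is None or v < hi)
--     buckets = [{k: v for k, v in restaurant_options.items() if in_bucket(i, v)}
--                for i in range(4)]
--     return [d for d in buckets if d]
-- ===== Notes on version B (the rewrite author's own statement) =====
-- stated objective: idiomatic
-- what changed: Item-major single loop accumulating four named dicts with four hand-written threshold tests is replaced by a bucket-major formulation: one generic boundary predicate in_bucket(i, v) over a table of 4 bucket indices, dict-comprehension filters per bucket, and a final comprehension keeping non-empty buckets.
import Mathlib
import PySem

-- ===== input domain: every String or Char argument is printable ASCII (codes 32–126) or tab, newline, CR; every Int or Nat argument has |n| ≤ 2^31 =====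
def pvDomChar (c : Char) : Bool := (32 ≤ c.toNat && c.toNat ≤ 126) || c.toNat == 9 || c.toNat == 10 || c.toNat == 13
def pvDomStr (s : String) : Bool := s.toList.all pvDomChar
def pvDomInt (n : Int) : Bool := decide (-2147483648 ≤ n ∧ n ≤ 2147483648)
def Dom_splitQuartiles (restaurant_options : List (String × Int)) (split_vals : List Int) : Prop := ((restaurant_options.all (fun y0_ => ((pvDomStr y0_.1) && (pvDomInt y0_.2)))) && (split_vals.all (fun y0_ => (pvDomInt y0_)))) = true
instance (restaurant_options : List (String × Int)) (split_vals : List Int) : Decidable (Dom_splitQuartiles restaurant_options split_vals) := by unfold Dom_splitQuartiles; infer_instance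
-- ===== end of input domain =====

-- B replaces A's item-major loop with four named dicts by a bucket-major table:
-- a generic boundary predicate, a filter pass per bucket index, then keep non-empty
-- buckets — an idiomatic restructuring; return value proved equal on Pre_.


-- ===== PORT A =====
-- One loop body iteration of A: four independent threshold tests, each inserting
-- into its own quartile dict. s0 s1 s2 are split_vals[0..2] (the loop reads them
-- every iteration; they are loop-invariant, so they are resolved once here).
def pvStepA (s0 s1 s2 : Int)
    (st : PySem.Dict String Int × PySem.Dict String Int × PySem.Dict String Int × PySem.Dict String Int)
    (kv : String × Int) :
    PySem.Dict String Int × PySem.Dict String Int × PySem.Dict String Int × PySem.Dict String Int :=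
  ( (if kv.2 < s0 then st.1.insert kv.1 kv.2 else st.1),
    (if kv.2 ≥ s0 ∧ kv.2 < s1 then st.2.1.insert kv.1 kv.2 else st.2.1),
    (if kv.2 ≥ s1 ∧ kv.2 < s2 then st.2.2.1.insert kv.1 kv.2 else st.2.2.1),
    (if kv.2 ≥ s2 then st.2.2.2.insert kv.1 kv.2 else st.2.2.2) )

def splitQuartiles (restaurant_options : List (String × Int)) (split_vals : List Int) : List (List (String × Int)) :=
  match PySem.List.pyGet? split_vals 0, PySem.List.pyGet? split_vals 1, PySem.List.pyGet? split_vals 2 with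
  | some s0, some s1, some s2 =>
      let st := restaurant_options.foldl (pvStepA s0 s1 s2)
        (PySem.Dict.empty, PySem.Dict.empty, PySem.Dict.empty, PySem.Dict.empty)
      (if st.1.size ≠ 0 then [st.1.items] else []) ++
      (if st.2.1.size ≠ 0 then [st.2.1.items] else []) ++
      (if st.2.2.1.size ≠ 0 then [st.2.2.1.items] else []) ++
      (if st.2.2.2.size ≠ 0 then [st.2.2.2.items] else [])
  -- split_vals shorter than 3: Python's A raises IndexError unless the loop body
  -- never runs (restaurant_options = {}), in which case it returns []. Pre_ admits
  -- only the latter, where [] is the faithful value.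
  | _, _, _ => []

-- ===== PORT B =====
-- in_bucket(i, v): lo = split_vals[i-1] if i > 0 else None; hi = split_vals[i] if i < 3 else None.
-- pyGet? = none corresponds to Python's IndexError; such inputs are excluded by Pre_
-- (and with restaurant_options = [] the predicate is never evaluated, as in Python).
def pvInBucket (split_vals : List Int) (i : Int) (v : Int) : Bool :=
  let lo := if i > 0 then PySem.List.pyGet? split_vals (i - 1) else none
  let hi := if i < 3 then PySem.List.pyGet? split_vals i else none
  (match lo with | none => true | some l => decide (v ≥ l)) &&
  (match hi with | none => true | some h => decide (v < h))

def splitQuartiles_alt (restaurant_options : List (String × Int)) (split_vals : List Int) : List (List (String × Int)) :=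
  let buckets := (PySem.List.pyRange 0 4 1).map
    (fun i => restaurant_options.filter (fun kv => pvInBucket split_vals i kv.2))
  buckets.filter (fun d => !d.isEmpty)

-- ===== PRECONDITION & SPEC =====
-- Pre_ excludes (a) inputs where A raises IndexError (non-empty restaurant_options with
-- fewer than 3 split values — B raises there too), and (b) association lists with
-- duplicate keys, which cannot arise from A's dict parameter (the list→dict conversion
-- collapses them, so either port's behaviour on them is unobservable in Python).
def Pre_splitQuartiles (restaurant_options : List (String × Int)) (split_vals : List Int) : Prop :=
  (restaurant_options = [] ∨ 3 ≤ split_vals.length) ∧ (restaurant_options.map Prod.fst).Nodup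
instance (restaurant_options : List (String × Int)) (split_vals : List Int) : Decidable (Pre_splitQuartiles restaurant_options split_vals) := by unfold Pre_splitQuartiles; infer_instance

def pvWitness_splitQuartiles : (List (String × Int)) × List Int := ([("a", 1), ("b", 5)], [2, 4, 6])

def Spec_splitQuartiles (restaurant_options : List (String × Int)) (split_vals : List Int) (out : List (List (String × Int))) : Prop := out = splitQuartiles_alt restaurant_options split_vals
instance (restaurant_options : List (String × Int)) (split_vals : List Int) (out : List (List (String × Int))) : Decidable (Spec_splitQuartiles restaurant_options split_vals out) := by unfold Spec_splitQuartiles; infer_instance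

-- ===== CLAIM (what is proved, stated in full; the proofs are below) =====
def Claim_equal_splitQuartiles : Prop := ∀ (restaurant_options : List (String × Int)) (split_vals : List Int), Dom_splitQuartiles restaurant_options split_vals → Pre_splitQuartiles restaurant_options split_vals → Spec_splitQuartiles restaurant_options split_vals (splitQuartiles restaurant_options split_vals)

-- ===== LEMMAS AND PROOFS =====

-- A's loop updates the four quartile dicts independently, so it splits into four folds.
lemma pvFoldl_stepA (s0 s1 s2 : Int) (l : List (String × Int))
    (a b c d : PySem.Dict String Int) :
    l.foldl (pvStepA s0 s1 s2) (a, b, c, d)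
      = (l.foldl (fun q kv => if kv.2 < s0 then q.insert kv.1 kv.2 else q) a,
         l.foldl (fun q kv => if kv.2 ≥ s0 ∧ kv.2 < s1 then q.insert kv.1 kv.2 else q) b,
         l.foldl (fun q kv => if kv.2 ≥ s1 ∧ kv.2 < s2 then q.insert kv.1 kv.2 else q) c,
         l.foldl (fun q kv => if kv.2 ≥ s2 then q.insert kv.1 kv.2 else q) d) := by
  induction l generalizing a b c d with
  | nil => rfl
  | cons x xs ih => simp [List.foldl_cons, pvStepA, ih]

-- A conditional-insert loop from the empty dict over nodup keys yields exactly the filter.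
lemma pvLoop_items (ro : List (String × Int)) (p : String × Int → Prop) [DecidablePred p]
    (hnd : (ro.map Prod.fst).Nodup) :
    (ro.foldl (fun d kv => if p kv then d.insert kv.1 kv.2 else d) PySem.Dict.empty).items
      = ro.filter (fun kv => decide (p kv)) := by
  rw [PySem.List.foldl_ite_eq_foldl_filter]
  have hsub : (ro.filter (fun kv => decide (p kv))).Sublist ro := List.filter_sublist (l := ro)
  have hnd' : ((ro.filter (fun kv => decide (p kv))).map Prod.fst).Nodup :=
    hnd.sublist (hsub.map Prod.fst)
  have := PySem.Dict.items_foldl_insert_fresh (l := ro.filter (fun kv => decide (p kv)))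
    (k := Prod.fst) (v := Prod.snd) (d := PySem.Dict.empty)
    (by intro a _; simp [PySem.Dict.contains_empty]) hnd'
  simpa using this

lemma pvSize_eq (d : PySem.Dict String Int) : d.size = d.items.length := rfl

lemma pvAppendIf (d1 d2 d3 d4 : List (String × Int)) :
    (if d1.length ≠ 0 then [d1] else []) ++ (if d2.length ≠ 0 then [d2] else []) ++
    (if d3.length ≠ 0 then [d3] else []) ++ (if d4.length ≠ 0 then [d4] else [])
      = [d1, d2, d3, d4].filter (fun d => !d.isEmpty) := by
  simp only [List.filter_cons, List.filter_nil, Bool.not_eq_eq_eq_not, Bool.not_true,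
    List.isEmpty_eq_false_iff]
  by_cases h1 : d1 = [] <;> by_cases h2 : d2 = [] <;> by_cases h3 : d3 = [] <;>
    by_cases h4 : d4 = [] <;> simp [h1, h2, h3, h4, List.length_eq_zero_iff]

-- ===== VERDICT (by name: the statement is the Claim_ definition above) =====
theorem splitQuartiles_spec : Claim_equal_splitQuartiles := by
  intro ro sv _ hpre
  obtain ⟨hlen, hnd⟩ := hpre
  unfold Spec_splitQuartiles
  have hr : PySem.List.pyRange 0 4 1 = [0, 1, 2, 3] := by decide
  rcases hlen with hro | hlen
  · subst hro
    cases h0 : PySem.List.pyGet? sv 0 <;> cases h1 : PySem.List.pyGet? sv 1 <;>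
      cases h2 : PySem.List.pyGet? sv 2 <;>
      simp [splitQuartiles, splitQuartiles_alt, h0, h1, h2, hr, List.filter]
  · have hl0 : 0 < sv.length := by omega
    have hl1 : 1 < sv.length := by omega
    have hl2 : 2 < sv.length := by omega
    have h0 : PySem.List.pyGet? sv 0 = some sv[0] := by simpa using PySem.List.pyGet?_ofNat sv _ hl0
    have h1 : PySem.List.pyGet? sv 1 = some sv[1] := by simpa using PySem.List.pyGet?_ofNat sv _ hl1
    have h2 : PySem.List.pyGet? sv 2 = some sv[2] := by simpa using PySem.List.pyGet?_ofNat sv _ hl2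
    have hb0 : ∀ kv : String × Int, pvInBucket sv 0 kv.2 = decide (kv.2 < sv[0]) := by
      intro kv; simp [pvInBucket, h0]
    have hb1 : ∀ kv : String × Int, pvInBucket sv 1 kv.2 = decide (kv.2 ≥ sv[0] ∧ kv.2 < sv[1]) := by
      intro kv
      simp [pvInBucket, h0, h1, Bool.decide_and]
    have hb2 : ∀ kv : String × Int, pvInBucket sv 2 kv.2 = decide (kv.2 ≥ sv[1] ∧ kv.2 < sv[2]) := by
      intro kv
      simp [pvInBucket, (by norm_num : (2:Int) - 1 = 1), h1, h2, Bool.decide_and]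
    have hb3 : ∀ kv : String × Int, pvInBucket sv 3 kv.2 = decide (kv.2 ≥ sv[2]) := by
      intro kv; simp [pvInBucket, (by norm_num : (3:Int) - 1 = 2), h2]
    have hfold : ro.foldl (pvStepA sv[0] sv[1] sv[2])
        (PySem.Dict.empty, PySem.Dict.empty, PySem.Dict.empty, PySem.Dict.empty)
      = (ro.foldl (fun d kv => if kv.2 < sv[0] then d.insert kv.1 kv.2 else d) PySem.Dict.empty,
         ro.foldl (fun d kv => if kv.2 ≥ sv[0] ∧ kv.2 < sv[1] then d.insert kv.1 kv.2 else d) PySem.Dict.empty,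
         ro.foldl (fun d kv => if kv.2 ≥ sv[1] ∧ kv.2 < sv[2] then d.insert kv.1 kv.2 else d) PySem.Dict.empty,
         ro.foldl (fun d kv => if kv.2 ≥ sv[2] then d.insert kv.1 kv.2 else d) PySem.Dict.empty) :=
      pvFoldl_stepA _ _ _ _ _ _ _ _
    simp only [splitQuartiles, splitQuartiles_alt, h0, h1, h2, hfold, hr, List.map_cons,
      List.map_nil]
    rw [pvSize_eq, pvSize_eq, pvSize_eq, pvSize_eq,
      pvLoop_items ro (fun kv => kv.2 < sv[0]) hnd,
      pvLoop_items ro (fun kv => kv.2 ≥ sv[0] ∧ kv.2 < sv[1]) hnd,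
      pvLoop_items ro (fun kv => kv.2 ≥ sv[1] ∧ kv.2 < sv[2]) hnd,
      pvLoop_items ro (fun kv => kv.2 ≥ sv[2]) hnd,
      List.filter_congr (fun kv _ => hb0 kv), List.filter_congr (fun kv _ => hb1 kv),
      List.filter_congr (fun kv _ => hb2 kv), List.filter_congr (fun kv _ => hb3 kv)]
    exact pvAppendIf _ _ _ _
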